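-- pv_equiv track=rewrite | github.com/fmarletaz/hagfish | rediploidization/scripts/get_informative_fams.py | check_fam
-- ===== SOURCE A (Python) =====
-- def check_fam(fam):
--
--     dup = {i[1] for i in fam}
--
--     if 'False' in dup:
--         return False
--
--     #needs at leat one 1R_1 and one 1R_2 in vertebrates
--     dup = {i[1].replace('alpha', '').replace('beta', '') for i in fam if 'alpha' in i[1] or 'beta' in i[1]}
--     if len(dup) != 2:
--         return False
--
--     #AT least one gene for hagfish and lamprey
--     sp =  {i[2] for i in fam}
--     if 'Parata' not in sp or 'Petmar' not in sp:
--         return False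
--
--     # at least one vertebrates with two copies
--     vert = {(i[2], i[1]) for i in fam if i[2] not in ['Petmar', 'Parata']}
--
--     vert_1 = {i[0] for i in vert if i[1].replace('alpha', '').replace('beta', '')=='1'}#1R_1
--     vert_2 = {i[0] for i in vert if i[1].replace('alpha', '').replace('beta', '')=='2'}#1R_2
--
--     if not vert_1.intersection(vert_2):
--         return False
--
--     return True
-- ===== SOURCE B (Python) =====
-- def check_fam(fam):
--     has_false = False
--     labels = set()
--     has_parata = False
--     has_petmar = False
--     copies = {}
--     for i in fam:
--         flag, sp = i[1], i[2]
--         if flag == 'False':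
--             has_false = True
--         if 'alpha' in flag or 'beta' in flag:
--             labels.add(flag.replace('alpha', '').replace('beta', ''))
--         if sp == 'Parata':
--             has_parata = True
--         if sp == 'Petmar':
--             has_petmar = True
--         if sp not in ('Petmar', 'Parata'):
--             core = flag.replace('alpha', '').replace('beta', '')
--             one, two = copies.get(sp, (False, False))
--             copies[sp] = (one or core == '1', two or core == '2')
--     return (not has_false and len(labels) == 2 and has_parata and has_petmar
--             and any(one and two for one, two in copies.values()))
-- ===== Notes on version B (the rewrite author's own statement) =====
-- stated objective: alternative
-- what changed: A builds four separate set/dict-free comprehension passes with early returns; B makes a single pass over fam accumulating a 'False'-flag, the distinct stripped alpha/beta labels, the two species flags and a per-species (has copy 1, has copy 2) dict, then applies one combined boolean check.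
import Mathlib
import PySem

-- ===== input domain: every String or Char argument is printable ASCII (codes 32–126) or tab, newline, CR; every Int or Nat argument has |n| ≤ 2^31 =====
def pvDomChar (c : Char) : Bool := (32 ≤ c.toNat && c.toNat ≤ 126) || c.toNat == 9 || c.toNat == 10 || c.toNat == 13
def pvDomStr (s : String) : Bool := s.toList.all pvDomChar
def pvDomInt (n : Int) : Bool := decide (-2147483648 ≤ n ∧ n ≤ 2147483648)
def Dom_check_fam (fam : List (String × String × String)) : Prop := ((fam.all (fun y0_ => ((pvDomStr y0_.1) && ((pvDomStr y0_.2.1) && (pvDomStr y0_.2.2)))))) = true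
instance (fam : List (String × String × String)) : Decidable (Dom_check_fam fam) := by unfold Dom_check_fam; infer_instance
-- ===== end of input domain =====

-- B restructures A's four set-comprehension passes into a single accumulating loop
-- followed by one combined boolean check (objective: alternative, same asymptotic cost).

-- shared atoms: both Pythons compute these exact expressions inline
def stripAB (s : String) : String :=
  PySem.Str.replace (PySem.Str.replace s "alpha" "") "beta" ""
def hasAB (s : String) : Bool :=
  PySem.Str.isIn "alpha" s || PySem.Str.isIn "beta" s
def nonPP (sp : String) : Bool :=
  !(sp == "Petmar" || sp == "Parata")

-- ===== PORT A =====
def check_fam (fam : List (String × String × String)) : Bool :=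
  let dup : PySem.Set String := PySem.Set.ofList (fam.map (fun i => i.2.1))
  if PySem.Set.contains dup "False" then false
  else
    let dup2 : PySem.Set String :=
      PySem.Set.ofList ((fam.filter (fun i => hasAB i.2.1)).map (fun i => stripAB i.2.1))
    if dup2.length ≠ 2 then false
    else
      let sp : PySem.Set String := PySem.Set.ofList (fam.map (fun i => i.2.2))
      if !(PySem.Set.contains sp "Parata") || !(PySem.Set.contains sp "Petmar") then false
      else
        let vert : PySem.Set (String × String) :=
          PySem.Set.ofList ((fam.filter (fun i => nonPP i.2.2)).map (fun i => (i.2.2, i.2.1)))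
        let vert1 : PySem.Set String :=
          PySem.Set.ofList ((vert.filter (fun p => stripAB p.2 == "1")).map (fun p => p.1))
        let vert2 : PySem.Set String :=
          PySem.Set.ofList ((vert.filter (fun p => stripAB p.2 == "2")).map (fun p => p.1))
        if (PySem.Set.inter vert1 vert2).isEmpty then false
        else true

-- ===== PORT B =====
-- the loop body of Source B (five accumulators)
def altStep (st : Bool × PySem.Set String × Bool × Bool × PySem.Dict String (Bool × Bool))
    (i : String × String × String) :
    Bool × PySem.Set String × Bool × Bool × PySem.Dict String (Bool × Bool) :=
  ( if i.2.1 == "False" then true else st.1,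
    if hasAB i.2.1 then PySem.Set.add st.2.1 (stripAB i.2.1) else st.2.1,
    if i.2.2 == "Parata" then true else st.2.2.1,
    if i.2.2 == "Petmar" then true else st.2.2.2.1,
    if nonPP i.2.2 then
      PySem.Dict.insert st.2.2.2.2 i.2.2
        ((PySem.Dict.getD st.2.2.2.2 i.2.2 (false, false)).1 || stripAB i.2.1 == "1",
         (PySem.Dict.getD st.2.2.2.2 i.2.2 (false, false)).2 || stripAB i.2.1 == "2")
    else st.2.2.2.2 )

def check_fam_alt (fam : List (String × String × String)) : Bool :=
  let st := fam.foldl altStep (false, PySem.Set.empty, false, false, PySem.Dict.empty)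
  !st.1 && (st.2.1.length == 2) && st.2.2.1 && st.2.2.2.1
    && (PySem.Dict.values st.2.2.2.2).any (fun p => p.1 && p.2)

-- ===== PRECONDITION & SPEC =====
def Spec_check_fam (fam : List (String × String × String)) (out : Bool) : Prop := out = check_fam_alt fam
instance (fam : List (String × String × String)) (out : Bool) : Decidable (Spec_check_fam fam out) := by unfold Spec_check_fam; infer_instance

-- ===== CLAIM (what is proved, stated in full; the proofs are below) =====
def Claim_equal_check_fam : Prop := ∀ (fam : List (String × String × String)), Dom_check_fam fam → Spec_check_fam fam (check_fam fam)

-- ===== LEMMAS AND PROOFS =====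

-- the dict-updating step of B's loop, isolated for the proofs
def dStep (d : PySem.Dict String (Bool × Bool)) (i : String × String × String) :
    PySem.Dict String (Bool × Bool) :=
  PySem.Dict.insert d i.2.2
    ((PySem.Dict.getD d i.2.2 (false, false)).1 || stripAB i.2.1 == "1",
     (PySem.Dict.getD d i.2.2 (false, false)).2 || stripAB i.2.1 == "2")

lemma altFold_eq (l : List (String × String × String))
    (st : Bool × PySem.Set String × Bool × Bool × PySem.Dict String (Bool × Bool)) :
    l.foldl altStep st
      = (st.1 || l.any (fun i => i.2.1 == "False"),
         List.foldl PySem.Set.add st.2.1 ((l.filter (fun i => hasAB i.2.1)).map (fun i => stripAB i.2.1)),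
         st.2.2.1 || l.any (fun i => i.2.2 == "Parata"),
         st.2.2.2.1 || l.any (fun i => i.2.2 == "Petmar"),
         (l.filter (fun i => nonPP i.2.2)).foldl dStep st.2.2.2.2) := by
  induction l generalizing st with
  | nil => simp
  | cons i t ih =>
      simp only [List.foldl_cons, ih, List.any_cons, List.filter_cons]
      by_cases h1 : i.2.1 == "False" <;>
      by_cases h2 : hasAB i.2.1 <;>
      by_cases h3 : i.2.2 == "Parata" <;>
      by_cases h4 : i.2.2 == "Petmar" <;>
      by_cases h5 : nonPP i.2.2 <;>
        simp [altStep, dStep, h1, h2, h3, h4, h5]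

lemma dictFold_getD (l : List (String × String × String)) (d : PySem.Dict String (Bool × Bool))
    (sp : String) :
    (l.foldl dStep d).getD sp (false, false)
      = ((d.getD sp (false, false)).1 || l.any (fun i => i.2.2 == sp && stripAB i.2.1 == "1"),
         (d.getD sp (false, false)).2 || l.any (fun i => i.2.2 == sp && stripAB i.2.1 == "2")) := by
  induction l generalizing d with
  | nil => simp
  | cons i t ih =>
      simp only [List.foldl_cons, ih, List.any_cons]
      by_cases h : sp = i.2.2
      · subst h
        simp [dStep, PySem.Dict.getD_insert_self, Bool.or_assoc]
      · have h' : (i.2.2 == sp) = false := by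
          simp [Ne.symm h]
        simp [dStep, PySem.Dict.getD_insert, h, h']

lemma dictFold_keys (l : List (String × String × String)) :
    (l.foldl dStep PySem.Dict.empty).keys = PySem.Set.ofList (l.map (fun i => i.2.2)) := by
  have h := PySem.Dict.keys_foldl_insert_key (ν := Bool × Bool) l (fun i => i.2.2)
    (fun d i => ((PySem.Dict.getD d i.2.2 (false, false)).1 || stripAB i.2.1 == "1",
                 (PySem.Dict.getD d i.2.2 (false, false)).2 || stripAB i.2.1 == "2"))
    PySem.Dict.empty
  simpa [dStep, PySem.Set.ofList_eq_foldl, PySem.Set.update] using h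

lemma dictFold_nodup (l : List (String × String × String)) :
    (l.foldl dStep PySem.Dict.empty).keys.Nodup := by
  have h := PySem.Dict.nodup_keys_foldl_insert_key (ν := Bool × Bool) l (fun i => i.2.2)
    (fun d i => ((PySem.Dict.getD d i.2.2 (false, false)).1 || stripAB i.2.1 == "1",
                 (PySem.Dict.getD d i.2.2 (false, false)).2 || stripAB i.2.1 == "2"))
    PySem.Dict.empty (by simp)
  simpa [dStep] using h

lemma contains_ofList_map {α : Type} [BEq α] [LawfulBEq α]
    (l : List (String × String × String)) (f : String × String × String → α) (x : α) :
    PySem.Set.contains (PySem.Set.ofList (l.map f)) x = l.any (fun i => f i == x) := by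
  rw [Bool.eq_iff_iff]
  simp [PySem.Set.contains, PySem.Set.mem_ofList, List.any_eq_true]

lemma final_eq (l : List (String × String × String)) :
    (PySem.Set.inter
        (PySem.Set.ofList (((PySem.Set.ofList (l.map (fun i => (i.2.2, i.2.1)))).filter (fun p => stripAB p.2 == "1")).map (fun p => p.1)))
        (PySem.Set.ofList (((PySem.Set.ofList (l.map (fun i => (i.2.2, i.2.1)))).filter (fun p => stripAB p.2 == "2")).map (fun p => p.1)))).isEmpty
      = !(l.foldl dStep PySem.Dict.empty).values.any (fun p => p.1 && p.2) := by
  have hnd := dictFold_nodup l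
  rw [Bool.eq_iff_iff, List.isEmpty_iff, Bool.not_eq_true']
  refine not_iff_not.mp ?_
  rw [Bool.not_eq_false]
  rw [← List.isEmpty_iff, Bool.not_eq_true, List.isEmpty_eq_false_iff_exists_mem]
  rw [PySem.Dict.values_eq_map_keys _ hnd (false, false), dictFold_keys, List.any_map]
  simp only [PySem.Set.mem_inter, PySem.Set.mem_ofList, List.mem_map, List.mem_filter,
    List.any_eq_true, Function.comp, dictFold_getD, PySem.Dict.getD_empty, Bool.false_or,
    Bool.and_eq_true, beq_iff_eq]
  constructor
  · rintro ⟨x, ⟨a, ⟨⟨i1, hi1, rfl⟩, hs1⟩, hx1⟩, ⟨b, ⟨⟨i2, hi2, rfl⟩, hs2⟩, hx2⟩⟩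
    exact ⟨x, ⟨i1, hi1, hx1⟩, ⟨i1, hi1, hx1, hs1⟩, ⟨i2, hi2, hx2, hs2⟩⟩
  · rintro ⟨x, -, ⟨i1, hi1, hx1, hs1⟩, ⟨i2, hi2, hx2, hs2⟩⟩
    exact ⟨x, ⟨(i1.2.2, i1.2.1), ⟨⟨i1, hi1, rfl⟩, hs1⟩, hx1⟩,
      ⟨(i2.2.2, i2.2.1), ⟨⟨i2, hi2, rfl⟩, hs2⟩, hx2⟩⟩

-- ===== VERDICT (by name: the statement is the Claim_ definition above) =====
theorem check_fam_spec : Claim_equal_check_fam := by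
  intro fam _
  show check_fam fam = check_fam_alt fam
  unfold check_fam check_fam_alt
  rw [altFold_eq]
  simp only [contains_ofList_map, PySem.Set.empty, ← PySem.Set.ofList_eq_foldl]
  by_cases h1 : fam.any (fun i => i.2.1 == "False")
  · simp [h1]
  · by_cases h2 : (PySem.Set.ofList ((fam.filter (fun i => hasAB i.2.1)).map (fun i => stripAB i.2.1))).length = 2
    · by_cases h3 : fam.any (fun i => i.2.2 == "Parata")
      · by_cases h4 : fam.any (fun i => i.2.2 == "Petmar")
        · have e1 : (fam.any fun i => i.2.1 == "False") = false := by
            simp only [Bool.not_eq_true] at h1; exact h1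
          rw [e1, h2, h3, h4, if_neg (by decide : ¬ (false = true)),
              if_neg (by decide : ¬ ((2:Nat) ≠ 2)),
              if_neg (by decide : ¬ ((!true || !true) = true))]
          rw [final_eq]
          cases h5 : ((fam.filter (fun i => nonPP i.2.2)).foldl dStep PySem.Dict.empty).values.any
              (fun p => p.1 && p.2) <;> decide

        · simp [h1, h2, h3, h4]
      · simp [h1, h2, h3]
    · simp [h1, h2]
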